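-- pv_equiv track=rewrite | github.com/lodarren/Bubble-Bites-Battle | source/picross.py | get_clue
-- ===== SOURCE A (Python) =====
-- def get_clue(line):
--     """Get the clue numbers for a row or column."""
--     clue = []
--     count = 0
--     for cell in line:
--         if cell == 1:
--             count += 1
--         elif count > 0:
--             clue.append(count)
--             count = 0
--     if count > 0:
--         clue.append(count)
--     return clue if clue else [0]
-- ===== SOURCE B (Python) =====
-- from itertools import groupby
--
--
-- def get_clue(line):
--     """Get the clue numbers for a row or column."""
--     clue = [sum(1 for _ in g) for k, g in groupby(line) if k == 1]
--     return clue if clue else [0]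
-- ===== Notes on version B (the rewrite author's own statement) =====
-- stated objective: idiomatic
-- what changed: Replaces the manual counter-with-flush loop over cells by itertools.groupby over maximal runs, keeping the lengths of the runs whose key is 1.
import Mathlib
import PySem

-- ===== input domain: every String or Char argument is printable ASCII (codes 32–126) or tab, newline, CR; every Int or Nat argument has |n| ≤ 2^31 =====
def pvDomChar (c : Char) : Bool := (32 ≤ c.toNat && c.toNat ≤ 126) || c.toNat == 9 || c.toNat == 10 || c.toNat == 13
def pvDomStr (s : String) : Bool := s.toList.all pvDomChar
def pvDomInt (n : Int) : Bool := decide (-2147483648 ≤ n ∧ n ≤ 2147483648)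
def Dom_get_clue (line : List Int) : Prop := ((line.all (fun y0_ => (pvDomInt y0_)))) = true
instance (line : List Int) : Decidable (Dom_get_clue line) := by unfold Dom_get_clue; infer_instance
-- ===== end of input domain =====

-- B replaces A's manual counter-with-flush loop by grouping the line into maximal
-- runs of equal cells and keeping the lengths of the runs of 1s (more idiomatic).


-- ===== PORT A =====
-- the loop body: one step per cell, state = (clue, count)
def getClueStep (s : List Int × Int) (cell : Int) : List Int × Int :=
  if cell = 1 then (s.1, s.2 + 1)
  else if 0 < s.2 then (s.1 ++ [s.2], 0)
  else s

def get_clue (line : List Int) : List Int :=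
  let s := line.foldl getClueStep ([], 0)
  let clue := if 0 < s.2 then s.1 ++ [s.2] else s.1
  if clue = [] then [0] else clue

-- ===== PORT B =====
-- itertools.groupby: maximal runs of consecutive equal elements, as (key, run length)
def groupRuns (l : List Int) : List (Int × Nat) :=
  match l with
  | [] => []
  | x :: xs =>
      (x, (xs.takeWhile (· == x)).length + 1) :: groupRuns (xs.dropWhile (· == x))
termination_by l.length
decreasing_by
  simp only [List.length_cons]
  exact Nat.lt_succ_of_le (List.length_dropWhile_le _ _)

def get_clue_alt (line : List Int) : List Int :=
  let clue := (groupRuns line).filterMap (fun g => if g.1 = 1 then some (g.2 : Int) else none)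
  if clue = [] then [0] else clue

-- ===== PRECONDITION & SPEC =====
def Spec_get_clue (line : List Int) (out : List Int) : Prop := out = get_clue_alt line
instance (line : List Int) (out : List Int) : Decidable (Spec_get_clue line out) := by unfold Spec_get_clue; infer_instance

-- ===== CLAIM (what is proved, stated in full; the proofs are below) =====
def Claim_equal_get_clue : Prop := ∀ (line : List Int), Dom_get_clue line → Spec_get_clue line (get_clue line)

-- ===== LEMMAS AND PROOFS =====

-- the clue list B computes
def clueOf (l : List Int) : List Int :=
  (groupRuns l).filterMap (fun g => if g.1 = 1 then some (g.2 : Int) else none)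

-- A's loop followed by the final flush, from an arbitrary accumulated clue and count 0
def acore (xs : List Int) (clue : List Int) : List Int :=
  let s := xs.foldl getClueStep (clue, 0)
  if 0 < s.2 then s.1 ++ [s.2] else s.1

theorem foldl_step_ones (run : List Int) (h : ∀ a ∈ run, a = 1) :
    ∀ clue count, run.foldl getClueStep (clue, count) = (clue, count + run.length) := by
  induction run with
  | nil => intro clue count; simp
  | cons x xs ih =>
      intro clue count
      have hx : x = 1 := h x (by simp)
      have hxs : ∀ a ∈ xs, a = 1 := fun a ha => h a (by simp [ha])
      simp only [List.foldl_cons, getClueStep, hx, ih hxs]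
      simp only [List.length_cons]
      refine Prod.ext ?_ ?_ <;> simp <;> try ring

theorem foldl_step_nonones (run : List Int) (h : ∀ a ∈ run, a ≠ 1) :
    ∀ clue, run.foldl getClueStep (clue, 0) = (clue, 0) := by
  induction run with
  | nil => intro clue; simp
  | cons x xs ih =>
      intro clue
      have hx : x ≠ 1 := h x (by simp)
      have hxs : ∀ a ∈ xs, a ≠ 1 := fun a ha => h a (by simp [ha])
      simp only [List.foldl_cons, getClueStep, if_neg hx]
      simp only [show ¬ ((0:Int) < 0) by omega, ite_false]
      exact ih hxs clue

theorem takeWhile_append_of (p : Int → Bool) (run rest : List Int)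
    (hr : ∀ a ∈ run, p a = true) (hh : ∀ a, rest.head? = some a → p a = false) :
    (run ++ rest).takeWhile p = run ∧ (run ++ rest).dropWhile p = rest := by
  induction run with
  | nil =>
      simp only [List.nil_append]
      cases rest with
      | nil => simp
      | cons y ys =>
          have := hh y (by simp)
          simp [this]
  | cons x xs ih =>
      have hx : p x = true := hr x (by simp)
      have hxs : ∀ a ∈ xs, p a = true := fun a ha => hr a (by simp [ha])
      have := ih hxs
      simp [hx, this.1, this.2]

-- a leading non-1 cell contributes nothing to B's clue
theorem clueOf_cons_nonone (z : Int) (ys : List Int) (hz : z ≠ 1) :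
    clueOf (z :: ys) = clueOf ys := by
  have hz' : ¬ (z = 1) := hz
  rw [clueOf, groupRuns]
  simp only [List.filterMap_cons, if_neg hz']
  set t := ys.takeWhile (· == z) with ht
  set d := ys.dropWhile (· == z) with hd
  have hyd : t ++ d = ys := List.takeWhile_append_dropWhile
  cases htc : t with
  | nil =>
      have : ys = d := by rw [← hyd, htc]; simp
      rw [← this]; rfl
  | cons t0 ts =>
      -- t's elements all equal z; d's head (if any) is not z
      have htall : ∀ a ∈ t, (a == z) = true := by
        intro a ha; rw [ht] at ha
        exact List.mem_takeWhile_imp (p := fun x => x == z) ha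
      have hdhead : ∀ a, d.head? = some a → (a == z) = false := by
        intro a ha
        have := List.head?_dropWhile_not (p := (· == z)) (l := ys)
        rw [← hd] at this
        cases hdc : d with
        | nil => simp [hdc] at ha
        | cons b bs =>
            rw [hdc] at ha; simp at ha; subst ha
            have := this
            rw [hdc] at this
            simpa using this
      have ht0 : t0 = z := by
        have := htall t0 (by rw [htc]; simp)
        simpa using this
      have hys : ys = t0 :: (ts ++ d) := by rw [← hyd, htc]; simp
      have htsall : ∀ a ∈ ts, ((· == z) a) = true := by
        intro a ha; exact htall a (by rw [htc]; simp [ha])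
      have hspan := takeWhile_append_of (· == z) ts d htsall hdhead
      rw [hys, clueOf, groupRuns, ht0]
      simp only [List.filterMap_cons, if_neg hz', hspan.1, hspan.2]

theorem acore_eq_clueOf : ∀ (n : Nat) (xs : List Int), xs.length ≤ n →
    ∀ clue, acore xs clue = clue ++ clueOf xs := by
  intro n
  induction n with
  | zero =>
      intro xs hxs clue
      have : xs = [] := by cases xs <;> simp_all
      subst this
      simp [acore, clueOf, groupRuns]
  | succ n ih =>
      intro xs hxs clue
      cases xs with
      | nil => simp [acore, clueOf, groupRuns]
      | cons x ys =>
          set t := ys.takeWhile (· == x) with ht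
          set d := ys.dropWhile (· == x) with hd
          have hyd : t ++ d = ys := List.takeWhile_append_dropWhile
          have htall : ∀ a ∈ t, a = x := by
            intro a ha
            have := List.mem_takeWhile_imp ha
            simpa using this
          have hdlen : d.length ≤ ys.length := List.length_dropWhile_le _ _
          have hylen : ys.length ≤ n := by simpa using hxs
          have hgr : groupRuns (x :: ys) = (x, t.length + 1) :: groupRuns d := by
            rw [groupRuns]
          have hfold : (x :: ys).foldl getClueStep (clue, 0)
              = d.foldl getClueStep ((x :: t).foldl getClueStep (clue, 0)) := by
            have : x :: ys = (x :: t) ++ d := by rw [← hyd]; rfl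
            rw [this, List.foldl_append]
          by_cases hx : x = 1
          · -- a maximal run of 1s of length t.length + 1
            have hones : ∀ a ∈ (x :: t), a = 1 := by
              intro a ha
              rcases List.mem_cons.mp ha with h | h
              · rw [h, hx]
              · rw [htall a h, hx]
            have h1 : (x :: t).foldl getClueStep (clue, 0) = (clue, (t.length : Int) + 1) := by
              rw [foldl_step_ones _ hones]
              simp [add_comm]
            have hrhs : clueOf (x :: ys) = ((t.length : Int) + 1) :: clueOf d := by
              rw [clueOf, hgr]
              simp [hx, clueOf]
            cases hdc : d with
            | nil =>
                rw [acore, hfold, h1, hdc]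
                simp only [List.foldl_nil]
                rw [hrhs, hdc]
                have : (0:Int) < (t.length : Int) + 1 := by positivity
                simp [this, clueOf, groupRuns]
            | cons y ys2 =>
                have hy : y ≠ 1 := by
                  have := List.head?_dropWhile_not (p := (· == x)) (l := ys)
                  rw [← hd, hdc] at this
                  simp at this
                  rw [hx] at this; exact this
                have hc : (0:Int) < (t.length : Int) + 1 := by positivity
                have hstep : getClueStep (clue, (t.length : Int) + 1) y
                    = (clue ++ [(t.length : Int) + 1], 0) := by
                  simp [getClueStep, hy, hc]
                have h2 : acore (x :: ys) clue = acore ys2 (clue ++ [(t.length : Int) + 1]) := by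
                  rw [acore, acore, hfold, h1, hdc, List.foldl_cons, hstep]
                rw [h2, ih ys2 (by
                      have : ys2.length < d.length := by rw [hdc]; simp
                      omega) _]
                rw [hrhs, hdc, clueOf_cons_nonone y ys2 hy]
                simp
          · -- a run of non-1 cells: contributes nothing on either side
            have hnon : ∀ a ∈ (x :: t), a ≠ 1 := by
              intro a ha
              rcases List.mem_cons.mp ha with h | h
              · rw [h]; exact hx
              · rw [htall a h]; exact hx
            have h1 : (x :: t).foldl getClueStep (clue, 0) = (clue, 0) :=
              foldl_step_nonones _ hnon clue
            have h2 : acore (x :: ys) clue = acore d clue := by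
              rw [acore, acore, hfold, h1]
            rw [h2, ih d (le_trans hdlen hylen) clue]
            have hco : clueOf (x :: ys) = clueOf d := by
              rw [clueOf, hgr]; simp [hx, clueOf]
            rw [hco]

-- ===== VERDICT (by name: the statement is the Claim_ definition above) =====
theorem get_clue_spec : Claim_equal_get_clue := by
  intro line _
  unfold Spec_get_clue get_clue get_clue_alt
  have := acore_eq_clueOf line.length line (le_refl _) []
  rw [acore] at this
  simp only [List.nil_append] at this
  simp only [clueOf] at this
  simp only [this]
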